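-- pv_equiv track=rewrite | github.com/ders03/Python | homeworks/pyramids.py | side_pyramid
-- ===== SOURCE A (Python) =====
-- def side_pyramid(row):
--         j = row
--         going_up = []
--         going_down = []
--         #for loop gets us to mid of pyramid
--         for x in range(1, row+1):
--             # iterates back down
--             j = j - 1
--             going_up.append("*"*x)
--             going_down.append("*"*j)
--         #snip off char at [0], adds extra space to printout
--         return("\n".join(going_up+going_down[:-1]))
-- ===== SOURCE B (Python) =====
-- def side_pyramid(row):
--     lines = []
--     for i in range(2 * row - 1):
--         lines.append("*" * (row - abs(i - (row - 1))))
--     return "\n".join(lines)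
-- ===== Notes on version B (the rewrite author's own statement) =====
-- stated objective: simpler
-- what changed: Single pass over the line indices, computing each line's star count by the closed center-distance formula, instead of building separate ascending and descending lists and trimming the last descending entry.
import Mathlib
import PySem

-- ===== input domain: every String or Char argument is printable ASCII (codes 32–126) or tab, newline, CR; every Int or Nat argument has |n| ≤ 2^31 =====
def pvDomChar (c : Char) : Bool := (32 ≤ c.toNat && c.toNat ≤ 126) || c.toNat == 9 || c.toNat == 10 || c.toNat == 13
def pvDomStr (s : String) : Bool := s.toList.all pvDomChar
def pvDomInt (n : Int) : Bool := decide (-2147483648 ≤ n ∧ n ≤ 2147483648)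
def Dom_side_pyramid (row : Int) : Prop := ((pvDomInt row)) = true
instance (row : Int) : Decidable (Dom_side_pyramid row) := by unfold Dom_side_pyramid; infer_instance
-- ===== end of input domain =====

-- B rewrites A's two-list (ascending + trimmed descending) construction as one pass over the
-- line indices with a center-distance star count per line; objective: simpler.

-- ===== PORT A =====
-- Python's "*" * n : empty for n ≤ 0, n stars otherwise (Int.toNat is exact here).
def pvStars (n : Int) : String := String.ofList (List.replicate n.toNat '*')

def side_pyramid (row : Int) : String :=
  let st := (PySem.List.pyRange 1 (row + 1) 1).foldl
    (fun (st : Int × List String × List String) x =>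
      let j := st.1 - 1
      (j, st.2.1 ++ [pvStars x], st.2.2 ++ [pvStars j]))
    (row, ([] : List String), ([] : List String))
  PySem.Str.join "\n" (st.2.1 ++ PySem.List.slice st.2.2 none (some (-1)))

-- ===== PORT B =====
def side_pyramid_alt (row : Int) : String :=
  PySem.Str.join "\n"
    ((PySem.List.pyRange 0 (2 * row - 1) 1).foldl
      (fun lines i => lines ++ [pvStars (row - |i - (row - 1)|)]) [])

-- ===== PRECONDITION & SPEC =====
def Spec_side_pyramid (row : Int) (out : String) : Prop := out = side_pyramid_alt row
instance (row : Int) (out : String) : Decidable (Spec_side_pyramid row out) := by unfold Spec_side_pyramid; infer_instance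

-- ===== CLAIM (what is proved, stated in full; the proofs are below) =====
def Claim_equal_side_pyramid : Prop := ∀ (row : Int), Dom_side_pyramid row → Spec_side_pyramid row (side_pyramid row)

-- ===== LEMMAS AND PROOFS =====

-- appending-fold = map (B's loop)
theorem pv_foldl_append_map {α β : Type} (f : α → β) (l : List α) (acc : List β) :
    l.foldl (fun lines i => lines ++ [f i]) acc = acc ++ l.map f := by
  induction l generalizing acc with
  | nil => simp
  | cons a t ih => simp [List.foldl, ih]

-- A's loop invariant: state after folding a list of length n
theorem pv_foldA (l : List Int) (j : Int) (up down : List String) :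
    l.foldl (fun (st : Int × List String × List String) x =>
        let j := st.1 - 1
        (j, st.2.1 ++ [pvStars x], st.2.2 ++ [pvStars j])) (j, up, down)
      = (j - l.length, up ++ l.map pvStars,
         down ++ (List.range l.length).map (fun k : Nat => pvStars (j - 1 - (k : Int)))) := by
  induction l generalizing j up down with
  | nil => simp
  | cons a t ih =>
    simp only [List.foldl, ih, List.length_cons]
    simp only [Prod.mk.injEq]
    refine ⟨by push_cast; ring, by rw [List.append_assoc]; rfl, ?_⟩
    rw [List.append_assoc]
    congr 1
    rw [List.range_succ_eq_map, List.map_cons, List.map_map, List.singleton_append]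
    congr 1
    · norm_num
    · refine List.map_congr_left fun k _ => ?_
      simp only [Function.comp_apply]
      congr 1
      push_cast; ring

set_option maxRecDepth 8000 in
theorem side_pyramid_spec : Claim_equal_side_pyramid := by
  intro row _
  unfold Spec_side_pyramid side_pyramid side_pyramid_alt
  rw [pv_foldl_append_map]
  by_cases hpos : 1 ≤ row
  · obtain ⟨n, hn⟩ : ∃ n : ℕ, row = (n : Int) + 1 := ⟨(row - 1).toNat, by omega⟩
    subst hn
    have hlen1 : ((n : Int) + 1 + 1 - 1).toNat = n + 1 := by omega
    have hlen2 : (2 * ((n : Int) + 1) - 1 - 0).toNat = 2 * n + 1 := by omega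
    rw [PySem.List.pyRange_one, PySem.List.pyRange_one, hlen1, hlen2]
    rw [pv_foldA]
    simp only [List.length_map, List.length_range, List.nil_append, List.map_map]
    rw [PySem.List.slice_to_neg_one]
    refine congrArg _ ?_
    have hdl : (List.range (n + 1)).dropLast = List.range n := by
      rw [List.range_succ, List.dropLast_concat]
    rw [← List.map_dropLast, hdl]
    apply List.ext_getElem
    · simp; omega
    · intro i h1 h2
      simp only [List.length_append, List.length_map, List.length_range] at h1
      by_cases hi : i < n + 1
      · rw [List.getElem_append_left (by simpa using hi)]
        simp only [List.getElem_map, List.getElem_range, Function.comp_apply]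
        refine congrArg pvStars ?_
        have : |(0 : Int) + (i : Int) - ((n : Int) + 1 - 1)| = (n : Int) - i := by
          rw [abs_of_nonpos (by omega)]; ring
        rw [this]; ring
      · rw [List.getElem_append_right (by simpa using hi)]
        simp only [List.length_map, List.length_range, List.getElem_map, List.getElem_range,
          Function.comp_apply]
        refine congrArg pvStars ?_
        have : |(0 : Int) + (i : Int) - ((n : Int) + 1 - 1)| = (i : Int) - n := by
          rw [abs_of_nonneg (by omega)]; omega
        rw [this]; push_cast; omega
  · rw [PySem.List.pyRange_one_eq_nil (by omega), PySem.List.pyRange_one_eq_nil (by omega)]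
    simp [PySem.List.slice]
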